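-- pv_equiv track=rewrite | github.com/tomsilver/programmatic-policy-learning | src/programmatic_policy_learning/dsl/llm_primitives/baselines/llm_based/trajectory_serializer.py | _local_patch
-- ===== SOURCE A (Python) =====
-- def _local_patch(grid: list[list[str]], r: int, c: int, window: int) -> list[list[str]]:
--     h = len(grid)
--     w = len(grid[0]) if h else 0
--     radius = window // 2
--     patch: list[list[str]] = []
--     for dr in range(-radius, radius + 1):
--         row: list[str] = []
--         for dc in range(-radius, radius + 1):
--             rr, cc = r + dr, c + dc
--             if 0 <= rr < h and 0 <= cc < w:
--                 row.append(grid[rr][cc])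
--             else:
--                 row.append("OOB")
--         patch.append(row)
--     return patch
-- ===== SOURCE B (Python) =====
-- def _local_patch(grid: list[list[str]], r: int, c: int, window: int) -> list[list[str]]:
--     h = len(grid)
--     w = len(grid[0]) if h else 0
--     radius = window // 2
--     n = 2 * radius + 1
--     if n <= 0:
--         return []
--     top, left = r - radius, c - radius
--     row0, row1 = max(top, 0), min(top + n, h)
--     col0, col1 = max(left, 0), min(left + n, w)
--     oob_row = ["OOB"] * n
--     if row1 <= row0 or col1 <= col0:
--         return [oob_row[:] for _ in range(n)]
--     lpad = ["OOB"] * (col0 - left)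
--     rpad = ["OOB"] * (left + n - col1)
--     core = [lpad + grid[i][col0:col1] + rpad for i in range(row0, row1)]
--     return ([oob_row[:] for _ in range(row0 - top)] + core
--             + [oob_row[:] for _ in range(top + n - row1)])
-- ===== Notes on version B (the rewrite author's own statement) =====
-- stated objective: alternative
-- what changed: Replaces the per-cell double loop with bound arithmetic: clamp the window to the grid, slice the overlapping rows/columns in bulk, and pad with replicated 'OOB' rows and cells to the fixed (2*radius+1) square.
import Mathlib
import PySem

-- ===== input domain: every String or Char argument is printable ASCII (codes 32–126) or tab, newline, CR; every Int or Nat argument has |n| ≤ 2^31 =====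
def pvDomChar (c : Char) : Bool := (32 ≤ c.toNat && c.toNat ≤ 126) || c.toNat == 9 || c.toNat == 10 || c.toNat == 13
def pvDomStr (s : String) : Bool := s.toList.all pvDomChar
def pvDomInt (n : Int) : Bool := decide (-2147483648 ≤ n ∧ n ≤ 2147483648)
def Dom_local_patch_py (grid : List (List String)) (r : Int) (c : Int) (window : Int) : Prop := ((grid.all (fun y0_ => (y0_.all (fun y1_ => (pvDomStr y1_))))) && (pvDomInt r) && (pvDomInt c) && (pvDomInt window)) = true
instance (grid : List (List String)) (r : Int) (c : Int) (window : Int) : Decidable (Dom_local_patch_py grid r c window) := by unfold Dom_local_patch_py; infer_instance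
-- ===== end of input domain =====

-- B replaces the per-cell double loop by clamped slice bounds plus replicated 'OOB' padding (alternative decomposition, same asymptotic cost).

-- ===== PORT A =====
def local_patch_py (grid : List (List String)) (r : Int) (c : Int) (window : Int) : List (List String) :=
  let h : Int := grid.length
  let w : Int := if grid.length ≠ 0 then ((grid.headD []).length : Int) else 0
  let radius : Int := PySem.Int.floordiv window 2
  (PySem.List.pyRange (-radius) (radius + 1) 1).foldl (fun patch dr =>
    patch ++ [(PySem.List.pyRange (-radius) (radius + 1) 1).foldl (fun row dc =>
      let rr := r + dr
      let cc := c + dc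
      row ++ [if 0 ≤ rr ∧ rr < h ∧ 0 ≤ cc ∧ cc < w
              then PySem.List.pyGetD (PySem.List.pyGetD grid rr []) cc "OOB"
              else "OOB"]) []]) []

-- ===== PORT B =====
def local_patch_py_alt (grid : List (List String)) (r : Int) (c : Int) (window : Int) : List (List String) :=
  let h : Int := grid.length
  let w : Int := if grid.length ≠ 0 then ((grid.headD []).length : Int) else 0
  let radius : Int := PySem.Int.floordiv window 2
  let n : Int := 2 * radius + 1
  if n ≤ 0 then []
  else
    let top := r - radius
    let left := c - radius
    let row0 := max top 0
    let row1 := min (top + n) h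
    let col0 := max left 0
    let col1 := min (left + n) w
    let oobRow := List.replicate n.toNat "OOB"
    if row1 ≤ row0 ∨ col1 ≤ col0 then List.replicate n.toNat oobRow
    else
      let lpad := List.replicate (col0 - left).toNat "OOB"
      let rpad := List.replicate (left + n - col1).toNat "OOB"
      let core := (PySem.List.pyRange row0 row1 1).map (fun i =>
        lpad ++ PySem.List.slice (PySem.List.pyGetD grid i []) (some col0) (some col1) ++ rpad)
      List.replicate (row0 - top).toNat oobRow ++ core ++ List.replicate (top + n - row1).toNat oobRow

-- ===== PRECONDITION & SPEC =====
-- Pre_ excludes exactly the inputs on which A raises IndexError: ragged grids where some row inside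
-- the window's row overlap is shorter than the window's clamped column end (A indexes past that row's end).
def Pre_local_patch_py (grid : List (List String)) (r : Int) (c : Int) (window : Int) : Prop :=
  ∀ i : Nat, i < grid.length →
    r - PySem.Int.floordiv window 2 ≤ (i : Int) →
    (i : Int) < r - PySem.Int.floordiv window 2 + (2 * PySem.Int.floordiv window 2 + 1) →
    max (c - PySem.Int.floordiv window 2) 0
      < min (c - PySem.Int.floordiv window 2 + (2 * PySem.Int.floordiv window 2 + 1))
          (if grid.length ≠ 0 then ((grid.headD []).length : Int) else 0) →
    min (c - PySem.Int.floordiv window 2 + (2 * PySem.Int.floordiv window 2 + 1))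
        (if grid.length ≠ 0 then ((grid.headD []).length : Int) else 0)
      ≤ ((grid.getD i []).length : Int)
instance (grid : List (List String)) (r : Int) (c : Int) (window : Int) : Decidable (Pre_local_patch_py grid r c window) := by unfold Pre_local_patch_py; infer_instance
def pvWitness_local_patch_py : List (List String) × Int × Int × Int := ([["a", "b"], ["c", "d"]], 0, 1, 3)

def Spec_local_patch_py (grid : List (List String)) (r : Int) (c : Int) (window : Int) (out : List (List String)) : Prop := out = local_patch_py_alt grid r c window
instance (grid : List (List String)) (r : Int) (c : Int) (window : Int) (out : List (List String)) : Decidable (Spec_local_patch_py grid r c window out) := by unfold Spec_local_patch_py; infer_instance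

-- ===== CLAIM (what is proved, stated in full; the proofs are below) =====
def Claim_equal_local_patch_py : Prop := ∀ (grid : List (List String)) (r : Int) (c : Int) (window : Int), Dom_local_patch_py grid r c window → Pre_local_patch_py grid r c window → Spec_local_patch_py grid r c window (local_patch_py grid r c window)

-- ===== LEMMAS AND PROOFS =====

-- the intended value of one cell of the patch, and the normal form both ports are reduced to (proof-only helpers)
def pvCell (grid : List (List String)) (rr cc : Int) : String :=
  if 0 ≤ rr ∧ rr < (grid.length : Int) ∧ 0 ≤ cc ∧
      cc < (if grid.length ≠ 0 then ((grid.headD []).length : Int) else 0)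
  then PySem.List.pyGetD (PySem.List.pyGetD grid rr []) cc "OOB"
  else "OOB"

def pvSpec (grid : List (List String)) (r : Int) (c : Int) (window : Int) : List (List String) :=
  let radius : Int := PySem.Int.floordiv window 2
  (List.range (2 * radius + 1).toNat).map (fun (i : Nat) =>
    (List.range (2 * radius + 1).toNat).map (fun (j : Nat) =>
      pvCell grid (r - radius + (i : Int)) (c - radius + (j : Int))))

lemma pvMapRangeConst {α : Type} (n : Nat) (f : Nat → α) (x : α)
    (h : ∀ k, k < n → f k = x) : (List.range n).map f = List.replicate n x := by
  apply List.eq_replicate_iff.mpr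
  constructor
  · simp
  · intro b hb
    simp only [List.mem_map, List.mem_range] at hb
    obtain ⟨k, hk, rfl⟩ := hb
    exact h k hk

lemma pvDropTakeEq {α : Type} (d : α) (l : List α) (p m : Nat) (h : p + m ≤ l.length) :
    (l.drop p).take m = (List.range m).map (fun k => l.getD (p + k) d) := by
  apply List.ext_getElem
  · simp; omega
  · intro i h1 h2
    simp only [List.getElem_take, List.getElem_drop, List.getElem_map, List.getElem_range]
    rw [List.getD_eq_getElem]

lemma pvMapRangeSplit {α : Type} (N a m b : Nat) (f : Nat → α) (hN : N = a + m + b) :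
    (List.range N).map f
      = (List.range a).map f ++ (List.range m).map (fun k => f (a + k))
          ++ (List.range b).map (fun k => f (a + m + k)) := by
  subst hN
  rw [List.range_add, List.map_append, List.range_add, List.map_append, List.map_map, List.map_map]
  rfl

lemma pvRowOOB (grid : List (List String)) (left : Int) (N : Nat) (rr : Int)
    (hout : rr < 0 ∨ (grid.length : Int) ≤ rr) :
    (List.range N).map (fun (j : Nat) => pvCell grid rr (left + (j : Int)))
      = List.replicate N "OOB" := by
  apply pvMapRangeConst
  intro k _
  unfold pvCell
  rw [if_neg]
  rintro ⟨h1, h2, -, -⟩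
  omega

lemma pvRowIn (grid : List (List String)) (left n w col0 col1 : Int) (rr : Int)
    (hlenr : col1 ≤ ((PySem.List.pyGetD grid rr []).length : Int))
    (hw : w = if grid.length ≠ 0 then ((grid.headD []).length : Int) else 0)
    (hcol0 : col0 = max left 0) (hcol1 : col1 = min (left + n) w)
    (hlt : col0 < col1) (hrr0 : 0 ≤ rr) (hrrh : rr < (grid.length : Int)) :
    List.replicate (col0 - left).toNat "OOB"
      ++ PySem.List.slice (PySem.List.pyGetD grid rr []) (some col0) (some col1)
      ++ List.replicate (left + n - col1).toNat "OOB"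
    = (List.range n.toNat).map (fun (j : Nat) => pvCell grid rr (left + (j : Int))) := by
  have hne : grid.length ≠ 0 := by omega
  have hrowdef : PySem.List.pyGetD grid rr [] = grid[rr.toNat]'(by omega) :=
    PySem.List.pyGetD_eq_getElem _ _ hrr0 hrrh
  rw [hrowdef] at hlenr
  rw [hrowdef, PySem.List.slice_toNat _ (by omega) (by omega),
    pvDropTakeEq "OOB" _ col0.toNat (col1.toNat - col0.toNat) (by omega)]
  rw [show n.toNat = (col0 - left).toNat + (col1.toNat - col0.toNat) + (left + n - col1).toNat from by omega]
  rw [List.range_add, List.map_append, List.range_add, List.map_append, List.map_map, List.map_map]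
  congr 1
  · congr 1
    · symm; apply pvMapRangeConst; intro k hk
      unfold pvCell; rw [if_neg]; rintro ⟨-, -, h3, h4⟩; omega
    · apply List.map_congr_left; intro k hk
      simp only [List.mem_range] at hk
      simp only [Function.comp]
      symm
      unfold pvCell
      rw [if_pos (by refine ⟨hrr0, hrrh, by omega, ?_⟩; rw [← hw]; omega)]
      rw [hrowdef, PySem.List.pyGetD_eq_getElem _ _ (by omega) (by omega)]
      rw [List.getD_eq_getElem _ _ (by omega)]
      congr 1
      omega
  · symm; apply pvMapRangeConst; intro k hk
    simp only [Function.comp]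
    unfold pvCell; rw [if_neg]; rintro ⟨-, -, h3, h4⟩
    rw [← hw] at h4
    omega

lemma pvB_core (grid : List (List String)) (h w top left n row0 row1 col0 col1 : Int)
    (Hpre : ∀ i : Nat, i < grid.length → top ≤ (i : Int) → (i : Int) < top + n →
      col0 < col1 → col1 ≤ ((grid.getD i []).length : Int))
    (Hh : h = (grid.length : Int))
    (Hw : w = if grid.length ≠ 0 then ((grid.headD []).length : Int) else 0)
    (Hn : 0 < n)
    (Hrow0 : row0 = max top 0) (Hrow1 : row1 = min (top + n) h)
    (Hcol0 : col0 = max left 0) (Hcol1 : col1 = min (left + n) w) :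
    (if row1 ≤ row0 ∨ col1 ≤ col0 then List.replicate n.toNat (List.replicate n.toNat "OOB")
     else
       List.replicate (row0 - top).toNat (List.replicate n.toNat "OOB")
         ++ (PySem.List.pyRange row0 row1 1).map (fun i =>
              List.replicate (col0 - left).toNat "OOB"
                ++ PySem.List.slice (PySem.List.pyGetD grid i []) (some col0) (some col1)
                ++ List.replicate (left + n - col1).toNat "OOB")
         ++ List.replicate (top + n - row1).toNat (List.replicate n.toNat "OOB"))
    = (List.range n.toNat).map (fun (i : Nat) =>
        (List.range n.toNat).map (fun (j : Nat) =>
          pvCell grid (top + (i : Int)) (left + (j : Int)))) := by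
  split_ifs with hg
  · symm
    apply pvMapRangeConst
    intro i hi
    rcases hg with hg | hg
    · exact pvRowOOB grid left n.toNat (top + i) (by omega)
    · apply pvMapRangeConst
      intro j hj
      unfold pvCell
      rw [if_neg]
      rw [← Hw, ← Hh]
      rintro ⟨h1, h2, h3, h4⟩
      omega
  · simp only [not_or, not_le] at hg
    obtain ⟨hr, hc⟩ := hg
    rw [pvMapRangeSplit n.toNat (row0 - top).toNat (row1 - row0).toNat (top + n - row1).toNat _ (by omega)]
    rw [PySem.List.pyRange_one, List.map_map]
    congr 1
    · congr 1
      · symm; apply pvMapRangeConst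
        intro i hi
        exact pvRowOOB grid left n.toNat (top + i) (by omega)
      · apply List.map_congr_left
        intro k hk
        simp only [List.mem_range] at hk
        simp only [Function.comp]
        rw [show top + (((row0 - top).toNat + k : Nat) : Int) = row0 + (k : Int) from by push_cast; omega]
        refine pvRowIn grid left n w col0 col1 (row0 + k) ?_ Hw Hcol0 Hcol1 (by omega) (by omega) (by omega)
        have h1 := Hpre (row0 + (k : Int)).toNat (by omega) (by omega) (by omega) hc
        rw [PySem.List.pyGetD_eq_getElem _ _ (by omega) (by omega)]
        rwa [List.getD_eq_getElem _ _ (by omega)] at h1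
    · symm; apply pvMapRangeConst
      intro i hi
      exact pvRowOOB grid left n.toNat (top + ((row0 - top).toNat + (row1 - row0).toNat + i : Nat)) (by push_cast; omega)

lemma pvA_eq_spec (grid : List (List String)) (r c window : Int) :
    local_patch_py grid r c window = pvSpec grid r c window := by
  unfold local_patch_py pvSpec
  simp only [PySem.List.foldl_append_singleton_eq_map, List.nil_append,
    PySem.List.pyRange_one, List.map_map]
  have hN : (PySem.Int.floordiv window 2 + 1 - -PySem.Int.floordiv window 2).toNat
      = (2 * PySem.Int.floordiv window 2 + 1).toNat := by omega
  rw [hN]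
  apply List.map_congr_left
  intro i _
  apply List.map_congr_left
  intro j _
  simp only [Function.comp]
  rw [show r + (-PySem.Int.floordiv window 2 + (i : Int)) = r - PySem.Int.floordiv window 2 + (i : Int) from by ring,
      show c + (-PySem.Int.floordiv window 2 + (j : Int)) = c - PySem.Int.floordiv window 2 + (j : Int) from by ring]
  rfl

lemma pvB_eq_spec (grid : List (List String)) (r c window : Int)
    (hpre : Pre_local_patch_py grid r c window) :
    local_patch_py_alt grid r c window = pvSpec grid r c window := by
  unfold local_patch_py_alt pvSpec
  simp only []
  by_cases hn : 2 * PySem.Int.floordiv window 2 + 1 ≤ 0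
  · rw [if_pos hn]
    rw [show (2 * PySem.Int.floordiv window 2 + 1).toNat = 0 from by omega]
    simp
  · rw [if_neg hn]
    unfold Pre_local_patch_py at hpre
    exact pvB_core grid _ _ _ _ _ _ _ _ _ hpre rfl rfl (by omega) rfl rfl rfl rfl

-- ===== VERDICT (by name: the statement is the Claim_ definition above) =====
theorem local_patch_py_spec : Claim_equal_local_patch_py := by
  intro grid r c window _ hpre
  unfold Spec_local_patch_py
  rw [pvA_eq_spec, pvB_eq_spec grid r c window hpre]
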